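-- pv_equiv track=rewrite | github.com/HyeonIn/2019-cap1-2019_8 | util/feature_extraction/docx_idf_feature.py | make_tokenize
-- ===== SOURCE A (Python) =====
-- def make_tokenize(feature_li, n):
--     f = set()
--     res = feature_li[0]
--     f.add(res)
--     for i in range(1, n):
--         res = res + '/' + feature_li[i]
--         f.add(res)
--
--     return f
-- ===== SOURCE B (Python) =====
-- def make_tokenize(feature_li, n):
--     f = {feature_li[0]}
--     f.update('/'.join(feature_li[:i + 1]) for i in range(1, n))
--     return f
-- ===== Notes on version B (the rewrite author's own statement) =====
-- stated objective: idiomatic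
-- what changed: Drops the running accumulator string: each prefix is recomputed independently as '/'.join(feature_li[:i+1]) and the set is built with one update from a generator.
import Mathlib
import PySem

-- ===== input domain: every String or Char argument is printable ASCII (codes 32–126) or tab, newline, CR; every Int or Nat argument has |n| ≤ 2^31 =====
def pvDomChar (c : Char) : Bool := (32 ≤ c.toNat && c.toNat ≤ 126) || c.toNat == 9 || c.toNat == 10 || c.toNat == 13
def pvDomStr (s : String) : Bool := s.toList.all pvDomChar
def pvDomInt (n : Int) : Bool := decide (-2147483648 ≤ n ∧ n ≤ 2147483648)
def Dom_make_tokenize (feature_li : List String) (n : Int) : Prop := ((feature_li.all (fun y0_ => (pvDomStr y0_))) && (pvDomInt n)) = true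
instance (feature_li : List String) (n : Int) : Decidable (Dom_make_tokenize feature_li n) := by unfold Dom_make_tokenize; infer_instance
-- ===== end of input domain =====

-- B recomputes each prefix independently as '/'.join(feature_li[:i+1]) instead of extending a running accumulator string (idiomatic decomposition; return values proved equal).


-- ===== PORT A =====
def make_tokenize (feature_li : List String) (n : Int) : List String :=
  let f : PySem.Set String := PySem.Set.empty
  let res : String := (PySem.List.pyGet? feature_li 0).getD ""
  let f := PySem.Set.add f res
  let st := (PySem.List.pyRange 1 n 1).foldl
      (fun (st : PySem.Set String × String) i =>
        let res := st.2 ++ "/" ++ (PySem.List.pyGet? feature_li i).getD ""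
        (PySem.Set.add st.1 res, res))
      (f, res)
  st.1

-- ===== PORT B =====
def make_tokenize_alt (feature_li : List String) (n : Int) : List String :=
  let f : PySem.Set String := PySem.Set.ofList [(PySem.List.pyGet? feature_li 0).getD ""]
  PySem.Set.update f ((PySem.List.pyRange 1 n 1).map
      (fun i => PySem.Str.join "/" (PySem.List.slice feature_li none (some (i + 1)))))

-- ===== PRECONDITION & SPEC =====
-- Pre_ excludes exactly the inputs on which A raises IndexError: an empty list (feature_li[0]) or n > len(feature_li) (feature_li[i] in the loop).
def Pre_make_tokenize (feature_li : List String) (n : Int) : Prop :=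
  feature_li ≠ [] ∧ n ≤ feature_li.length
instance (feature_li : List String) (n : Int) : Decidable (Pre_make_tokenize feature_li n) := by unfold Pre_make_tokenize; infer_instance
def pvWitness_make_tokenize : List String × Int := (["ab", "c", "c"], 3)

def Spec_make_tokenize (feature_li : List String) (n : Int) (out : List String) : Prop := out = make_tokenize_alt feature_li n
instance (feature_li : List String) (n : Int) (out : List String) : Decidable (Spec_make_tokenize feature_li n out) := by unfold Spec_make_tokenize; infer_instance

-- ===== CLAIM (what is proved, stated in full; the proofs are below) =====
def Claim_equal_make_tokenize : Prop := ∀ (feature_li : List String) (n : Int), Dom_make_tokenize feature_li n → Pre_make_tokenize feature_li n → Spec_make_tokenize feature_li n (make_tokenize feature_li n)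

-- ===== LEMMAS AND PROOFS =====

-- sep.join(l + [x]) appends 'sep + x' when l is nonempty (Chars level)
lemma chars_join_append (sep x : List Char) (l : List (List Char)) (h : l ≠ []) :
    PySem.Chars.join sep (l ++ [x]) = PySem.Chars.join sep l ++ sep ++ x := by
  induction l with
  | nil => simp at h
  | cons a t ih =>
    cases t with
    | nil => simp [PySem.Chars.join_singleton, PySem.Chars.join_cons_cons]
    | cons b t' =>
      calc PySem.Chars.join sep ((a :: b :: t') ++ [x])
          = a ++ sep ++ PySem.Chars.join sep ((b :: t') ++ [x]) :=
            PySem.Chars.join_cons_cons sep a b (t' ++ [x])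
        _ = a ++ sep ++ (PySem.Chars.join sep (b :: t') ++ sep ++ x) := by
            rw [ih (by simp)]
        _ = PySem.Chars.join sep (a :: b :: t') ++ sep ++ x := by
            rw [PySem.Chars.join_cons_cons]; simp

-- '/'.join(fl[:k+1]) = '/'.join(fl[:k]) + '/' + fl[k]  for 1 ≤ k < len(fl)
lemma join_take_succ (fl : List String) (k : Nat) (h1 : 1 ≤ k) (hk : k < fl.length) :
    PySem.Str.join "/" (fl.take (k + 1)) = PySem.Str.join "/" (fl.take k) ++ "/" ++ fl[k] := by
  apply String.toList_inj.mp
  rw [List.take_add_one]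
  simp only [PySem.Str.toList_join, String.toList_append, List.getElem?_eq_getElem hk]
  simp only [Option.toList, List.map_append, List.map_cons, List.map_nil]
  refine chars_join_append _ _ _ ?_
  intro hc
  rw [List.map_eq_nil_iff, List.take_eq_nil_iff] at hc
  rcases hc with h0 | h0
  · omega
  · subst h0; simp at hk

-- A's accumulator res equals '/'.join(fl[:i]) throughout; its loop performs exactly B's adds
lemma loop_aux (fl : List String) (k : Nat) :
    ∀ (a : Int) (s : PySem.Set String), 1 ≤ a → a + k ≤ fl.length →
    (PySem.List.pyRange a (a + k) 1).foldl
        (fun (st : PySem.Set String × String) i =>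
          let res := st.2 ++ "/" ++ (PySem.List.pyGet? fl i).getD ""
          (PySem.Set.add st.1 res, res))
        (s, PySem.Str.join "/" (fl.take a.toNat)) =
      ((PySem.List.pyRange a (a + k) 1).foldl
          (fun s i => PySem.Set.add s (PySem.Str.join "/" (fl.take (i + 1).toNat))) s,
        PySem.Str.join "/" (fl.take (a + k).toNat)) := by
  induction k with
  | zero =>
    intro a s ha hlen
    rw [show a + ((0:Nat):Int) = a by push_cast; ring, PySem.List.pyRange_one_eq_nil le_rfl]
    simp
  | succ k ih =>
    intro a s ha hlen
    have hlen' : a < (fl.length : Int) := by push_cast at hlen ⊢; omega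
    have hcast : a + (((k+1:Nat)):Int) = (a + 1) + (k:Int) := by push_cast; ring
    rw [hcast, PySem.List.pyRange_one_cons (by omega)]
    simp only [List.foldl_cons]
    have hget : (PySem.List.pyGet? fl a).getD "" = fl[a.toNat]'(by omega) :=
      PySem.List.pyGetD_eq_getElem fl (i := a) "" (by omega) hlen'
    have htn : ((a:Int) + 1).toNat = a.toNat + 1 := by omega
    have hres : PySem.Str.join "/" (fl.take a.toNat) ++ "/" ++ (PySem.List.pyGet? fl a).getD ""
        = PySem.Str.join "/" (fl.take ((a:Int) + 1).toNat) := by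
      rw [hget, htn, join_take_succ fl a.toNat (by omega) (by omega)]
    rw [hres, ih (a + 1) _ (by omega) (by omega)]

-- fl[0] = '/'.join(fl[:1]) for nonempty fl
lemma head_eq_join_take_one (fl : List String) (h : fl ≠ []) :
    (PySem.List.pyGet? fl 0).getD "" = PySem.Str.join "/" (fl.take 1) := by
  cases fl with
  | nil => simp at h
  | cons x t =>
    apply String.toList_inj.mp
    simp [PySem.Str.toList_join, PySem.Chars.join_singleton, PySem.List.pyGet?, PySem.List.pyIdx?]

-- ===== VERDICT (by name: the statement is the Claim_ definition above) =====
theorem make_tokenize_spec : Claim_equal_make_tokenize := by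
  intro fl n _ hpre
  obtain ⟨hne, hlen⟩ := hpre
  unfold Spec_make_tokenize make_tokenize make_tokenize_alt
  simp only []
  by_cases hn : n ≤ 1
  · rw [PySem.List.pyRange_one_eq_nil hn]
    rfl
  · have h1n : (1:Int) ≤ n := by omega
    have hk : (1:Int) + ((n - 1).toNat : Int) = n := by omega
    have hstart : (PySem.List.pyGet? fl 0).getD ""
        = PySem.Str.join "/" (fl.take ((1:Int)).toNat) := by
      simpa using head_eq_join_take_one fl hne
    rw [hstart]
    have := loop_aux fl (n - 1).toNat 1 (PySem.Set.add PySem.Set.empty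
        (PySem.Str.join "/" (fl.take ((1:Int)).toNat))) le_rfl (by omega)
    rw [hk] at this
    rw [this]
    show _ = PySem.Set.update _ _
    rw [show PySem.Set.update (PySem.Set.ofList [PySem.Str.join "/" (fl.take ((1:Int)).toNat)])
          ((PySem.List.pyRange 1 n 1).map
            (fun i => PySem.Str.join "/" (PySem.List.slice fl none (some (i + 1)))))
        = ((PySem.List.pyRange 1 n 1).map
            (fun i => PySem.Str.join "/" (PySem.List.slice fl none (some (i + 1))))).foldl
            PySem.Set.add (PySem.Set.ofList [PySem.Str.join "/" (fl.take ((1:Int)).toNat)]) from rfl]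
    rw [List.foldl_map]
    refine (PySem.List.foldl_congr_mem _ _ _ _ ?_).symm
    intro acc i hi
    rw [PySem.List.mem_pyRange_one] at hi
    rw [PySem.List.slice_to fl (by omega)]
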